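-- pv_equiv track=rewrite | github.com/jwalin-shah/tensor-logic | experiments/exp72_characterize_tail_sets.py | dyadic_buckets
-- ===== SOURCE A (Python) =====
-- def dyadic_buckets(elts, x):
--     """Return list of (lo, hi, count) for buckets [x, 2x), [2x, 4x), ..."""
--     buckets = []
--     lo = x
--     while lo <= max(elts) if elts else 0:
--         hi = lo * 2
--         cnt = sum(1 for a in elts if lo <= a < hi)
--         buckets.append((lo, hi, cnt))
--         if not elts or hi > max(elts):
--             break
--         lo = hi
--     return buckets
-- ===== SOURCE B (Python) =====
-- def dyadic_buckets(elts, x):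
--     """Return list of (lo, hi, count) for buckets [x, 2x), [2x, 4x), ..."""
--     if not elts:
--         return []
--     m = max(elts)
--     if x > m:
--         return []
--     counts = {}
--     for a in elts:
--         if a >= x:
--             i = (a // x).bit_length() - 1
--             counts[i] = counts.get(i, 0) + 1
--     nb = (m // x).bit_length()
--     return [(x * 2 ** i, x * 2 ** (i + 1), counts.get(i, 0)) for i in range(nb)]
-- ===== Notes on version B (the rewrite author's own statement) =====
-- stated objective: faster
-- what changed: B replaces A's while-loop that rescans the whole list once per bucket with a single pass that assigns each element its bucket index via (a//x).bit_length()-1 into a counting dict, then emits the buckets by a closed-form range.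
import Mathlib
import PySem

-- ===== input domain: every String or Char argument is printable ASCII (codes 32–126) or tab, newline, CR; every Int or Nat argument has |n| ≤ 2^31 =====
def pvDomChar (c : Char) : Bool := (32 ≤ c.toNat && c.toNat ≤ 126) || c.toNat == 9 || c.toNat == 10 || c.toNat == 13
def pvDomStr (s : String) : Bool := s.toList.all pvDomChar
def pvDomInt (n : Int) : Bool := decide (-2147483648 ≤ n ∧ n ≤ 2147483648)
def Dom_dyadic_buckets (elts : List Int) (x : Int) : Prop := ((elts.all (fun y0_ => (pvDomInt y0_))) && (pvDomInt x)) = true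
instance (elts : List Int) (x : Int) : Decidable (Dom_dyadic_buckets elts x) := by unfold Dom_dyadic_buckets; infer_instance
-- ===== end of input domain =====

-- B replaces A's per-bucket rescans of the list with one counting pass keyed by (a//x).bit_length()-1
-- plus a closed-form bucket range (objective: faster).

-- ===== PORT A =====
-- A's while loop; 'max(elts)' is loop-invariant, computed once as m; the fuel argument only
-- makes the loop total in Lean — inside Pre_ and Dom 64 iterations are never exhausted.
def dyALoop (elts : List Int) (m : Int) : Nat → Int → List (Int × Int × Int) → List (Int × Int × Int)
  | 0, _, acc => acc
  | fuel+1, lo, acc =>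
    if lo ≤ m then
      let hi := lo * 2
      let cnt : Int := (elts.map (fun a => if lo ≤ a ∧ a < hi then (1:Int) else 0)).sum
      let acc' := acc ++ [(lo, hi, cnt)]
      if hi > m then acc' else dyALoop elts m fuel hi acc'
    else acc

def dyadic_buckets (elts : List Int) (x : Int) : List (Int × Int × Int) :=
  match elts with
  | [] => []      -- 'lo <= max(elts) if elts else 0': condition falsy, loop never entered
  | e :: rest => dyALoop (e :: rest) (rest.foldl max e) 64 x []

-- ===== PORT B =====
-- bucket index of a: (a // x).bit_length() - 1
def bIdx (x a : Int) : Int := (PySem.Int.bitLength (PySem.Int.floordiv a x) : Int) - 1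

def dyadic_buckets_alt (elts : List Int) (x : Int) : List (Int × Int × Int) :=
  match elts with
  | [] => []
  | e :: rest =>
    let m := rest.foldl max e
    if x > m then []
    else
      let counts := elts.foldl (fun d a =>
        if x ≤ a then d.insert (bIdx x a) (d.getD (bIdx x a) 0 + 1) else d) PySem.Dict.empty
      let nb : Int := (PySem.Int.bitLength (PySem.Int.floordiv m x) : Int)
      (PySem.List.pyRange 0 nb 1).map (fun i =>
        (x * 2 ^ i.toNat, x * 2 ^ (i + 1).toNat, counts.getD i 0))

-- ===== PRECONDITION & SPEC =====
-- Pre_ excludes exactly the inputs where A never returns: for x ≤ 0 with some element ≥ x the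
-- while loop keeps doubling lo away from the break condition and never stops (A diverges there).
def Pre_dyadic_buckets (elts : List Int) (x : Int) : Prop := 0 < x ∨ ∀ a ∈ elts, a < x
instance (elts : List Int) (x : Int) : Decidable (Pre_dyadic_buckets elts x) := by
  unfold Pre_dyadic_buckets; infer_instance

def pvWitness_dyadic_buckets : List Int × Int := ([1, 2, 3, 5, 9], 1)

def Spec_dyadic_buckets (elts : List Int) (x : Int) (out : List (Int × Int × Int)) : Prop := out = dyadic_buckets_alt elts x
instance (elts : List Int) (x : Int) (out : List (Int × Int × Int)) : Decidable (Spec_dyadic_buckets elts x out) := by unfold Spec_dyadic_buckets; infer_instance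

-- ===== CLAIM (what is proved, stated in full; the proofs are below) =====
def Claim_equal_dyadic_buckets : Prop := ∀ (elts : List Int) (x : Int), Dom_dyadic_buckets elts x → Pre_dyadic_buckets elts x → Spec_dyadic_buckets elts x (dyadic_buckets elts x)

-- ===== LEMMAS AND PROOFS =====

-- bit_length brackets: for q ≥ 1, bit_length(q) - 1 = n iff 2^n ≤ q < 2^(n+1)
theorem bitLength_sub_one_eq {q : Int} {n : Nat} (hq : 1 ≤ q) :
    ((PySem.Int.bitLength q : Int) - 1 = (n : Int)) ↔ ((2:Int)^n ≤ q ∧ q < 2^(n+1)) := by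
  have hq0 : q ≠ 0 := by omega
  have h1 := PySem.Int.lt_two_pow_bitLength q
  have h2 := PySem.Int.two_pow_bitLength_le q hq0
  set L := PySem.Int.bitLength q with hL
  have hL1 : 1 ≤ L := by
    by_contra h
    interval_cases L
    · simp at h1; omega
  have habs : (q.natAbs : Int) = q := Int.natAbs_of_nonneg (by omega)
  constructor
  · intro h
    have hLn : L = n + 1 := by omega
    rw [hLn] at h1 h2
    simp at h2
    constructor
    · calc (2:Int)^n = ((2^n : Nat) : Int) := by push_cast; ring
        _ ≤ (q.natAbs : Int) := by exact_mod_cast h2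
        _ = q := habs
    · calc q = (q.natAbs : Int) := habs.symm
        _ < ((2^(n+1) : Nat) : Int) := by exact_mod_cast h1
        _ = 2^(n+1) := by push_cast; ring
  · rintro ⟨hlo, hhi⟩
    have hlo' : 2^n ≤ q.natAbs := by
      have : ((2^n : Nat) : Int) ≤ (q.natAbs : Int) := by rw [habs]; push_cast; linarith
      exact_mod_cast this
    have hhi' : q.natAbs < 2^(n+1) := by
      have : (q.natAbs : Int) < ((2^(n+1) : Nat) : Int) := by rw [habs]; push_cast; linarith
      exact_mod_cast this
    have e1 : L - 1 < n + 1 := by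
      have := lt_of_le_of_lt h2 hhi'
      exact (Nat.pow_lt_pow_iff_right (by norm_num)).mp this
    have e2 : n < L := by
      have := lt_of_le_of_lt hlo' h1
      exact (Nat.pow_lt_pow_iff_right (by norm_num)).mp this
    omega

theorem lt_bitLength_of_pow_le {q : Int} {j : Nat} (h : (2:Int)^j ≤ q) :
    j < PySem.Int.bitLength q := by
  have h1 := PySem.Int.lt_two_pow_bitLength q
  have hq : 0 < q := lt_of_lt_of_le (by positivity) h
  have habs : (q.natAbs : Int) = q := Int.natAbs_of_nonneg (by omega)
  have : 2^j ≤ q.natAbs := by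
    have : ((2^j : Nat) : Int) ≤ (q.natAbs : Int) := by rw [habs]; push_cast; linarith
    exact_mod_cast this
  exact (Nat.pow_lt_pow_iff_right (by norm_num)).mp (lt_of_le_of_lt this h1)

-- membership in bucket n
theorem bucket_mem_iff {x a : Int} (hx : 0 < x) (n : Nat) :
    (x ≤ a ∧ bIdx x a = (n : Int)) ↔ (x * 2^n ≤ a ∧ a < x * 2^(n+1)) := by
  have hp : (1:Int) ≤ 2^n := one_le_pow₀ (by norm_num)
  constructor
  · rintro ⟨hxa, hb⟩
    have hq : 1 ≤ PySem.Int.floordiv a x := by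
      rw [PySem.Int.le_floordiv_iff_mul_le hx]; linarith
    rw [bIdx, bitLength_sub_one_eq hq] at hb
    obtain ⟨h1, h2⟩ := hb
    constructor
    · have := (PySem.Int.le_floordiv_iff_mul_le hx).mp h1; linarith
    · have := (PySem.Int.floordiv_lt_iff_lt_mul hx).mp h2; linarith
  · rintro ⟨h1, h2⟩
    have hxa : x ≤ a := le_trans (by nlinarith) h1
    have hq : 1 ≤ PySem.Int.floordiv a x := by
      rw [PySem.Int.le_floordiv_iff_mul_le hx]; linarith
    refine ⟨hxa, ?_⟩
    rw [bIdx, bitLength_sub_one_eq hq]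
    constructor
    · rw [PySem.Int.le_floordiv_iff_mul_le hx]; linarith
    · rw [PySem.Int.floordiv_lt_iff_lt_mul hx]; linarith

-- the counting dict of B evaluated at bucket n
theorem counts_getD (elts : List Int) (x : Int) (hx : 0 < x) (n : Nat) :
    (elts.foldl (fun d a =>
        if x ≤ a then d.insert (bIdx x a) (d.getD (bIdx x a) 0 + 1) else d)
      PySem.Dict.empty).getD (n : Int) 0
    = ((elts.filter (fun a => decide (x * 2^n ≤ a ∧ a < x * 2^(n+1)))).length : Int) := by
  have e1 : (elts.foldl (fun d a =>
        if x ≤ a then d.insert (bIdx x a) (d.getD (bIdx x a) 0 + 1) else d) PySem.Dict.empty)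
      = (elts.filter (fun a => decide (x ≤ a))).foldl
          (fun d a => d.insert (bIdx x a) (d.getD (bIdx x a) (0:Int) + 1)) PySem.Dict.empty :=
    PySem.List.foldl_ite_eq_foldl_filter (fun a : Int => x ≤ a) _ elts _
  rw [e1]
  rw [← List.foldl_map (f := bIdx x)
      (g := fun d k => PySem.Dict.insert d k (PySem.Dict.getD d k 0 + 1))]
  rw [PySem.Dict.foldl_insert_getD_add_one_eq_counter, PySem.Dict.getD_counter]
  rw [List.count_eq_countP, List.countP_map]
  rw [List.countP_filter]
  rw [← List.countP_eq_length_filter]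
  congr 1
  apply List.countP_congr
  intro a _
  have hiff := bucket_mem_iff (a := a) hx n
  simp only [Function.comp]
  constructor
  · intro h
    simp only [Bool.and_eq_true, beq_iff_eq, decide_eq_true_eq] at h ⊢
    exact hiff.mp ⟨h.2, h.1⟩
  · intro h
    simp only [Bool.and_eq_true, beq_iff_eq, decide_eq_true_eq] at h ⊢
    have h2 := hiff.mpr h
    exact ⟨h2.2, h2.1⟩

-- A's loop, from lo = x·2^j with enough fuel, appends exactly the buckets j … bit_length(m//x)-1
theorem dyALoop_eq (elts : List Int) (m x : Int) (hx : 0 < x) :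
    ∀ (fuel j : Nat) (acc : List (Int × Int × Int)),
      x * 2^j ≤ m → m < x * 2^(j + fuel) →
      dyALoop elts m fuel (x * 2^j) acc
        = acc ++ (PySem.List.pyRange (j : Int) ((PySem.Int.bitLength (PySem.Int.floordiv m x) : Int)) 1).map
            (fun i => (x * 2^i.toNat, x * 2^(i.toNat+1),
              ((elts.filter (fun a => decide (x * 2^i.toNat ≤ a ∧ a < x * 2^(i.toNat+1)))).length : Int))) := by
  intro fuel
  induction fuel with
  | zero =>
    intro j acc hlo hfuel
    exfalso; simp at hfuel; omega
  | succ fuel ih =>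
    intro j acc hlo hfuel
    have hjlt : (j : Int) < (PySem.Int.bitLength (PySem.Int.floordiv m x) : Int) := by
      have h2 : (2:Int)^j ≤ PySem.Int.floordiv m x := by
        rw [PySem.Int.le_floordiv_iff_mul_le hx]; linarith
      exact_mod_cast lt_bitLength_of_pow_le h2
    have hcnt : (elts.map (fun a => if x * 2^j ≤ a ∧ a < x * 2^j * 2 then (1:Int) else 0)).sum
        = ((elts.filter (fun a => decide (x * 2^j ≤ a ∧ a < x * 2^(j+1)))).length : Int) := by
      have := PySem.List.sum_map_ite_one_zero
        (fun a : Int => decide (x * 2^j ≤ a ∧ a < x * 2^j * 2)) elts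
      simp only [decide_eq_true_eq] at this
      rw [this, List.countP_eq_length_filter]
      congr 2
      apply List.filter_congr
      intro a _
      simp only [decide_eq_decide]
      constructor
      · rintro ⟨u, v⟩; exact ⟨u, by rw [pow_succ]; linarith⟩
      · rintro ⟨u, v⟩; exact ⟨u, by rw [pow_succ] at v; linarith⟩
    rw [dyALoop, if_pos hlo]
    simp only []
    by_cases hbr : x * 2^j * 2 > m
    · rw [if_pos hbr]
      have hnb : (PySem.Int.bitLength (PySem.Int.floordiv m x) : Int) = (j : Int) + 1 := by
        have := (bucket_mem_iff (x := x) (a := m) hx j).mpr ⟨hlo, by rw [pow_succ]; linarith⟩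
        rw [bIdx] at this; omega
      rw [hnb]
      rw [PySem.List.pyRange_one_singleton]
      simp only [List.map_cons, List.map_nil, Int.toNat_natCast]
      rw [hcnt]
      rw [show x * 2^j * 2 = x * 2^(j+1) from by rw [pow_succ]; ring]
      rfl
    · rw [if_neg hbr]
      have hstep : x * 2^j * 2 = x * 2^(j+1) := by rw [pow_succ]; ring
      have hle : x * 2^(j+1) ≤ m := by have := not_lt.mp hbr; linarith [hstep]
      have hfu : m < x * 2^(j+1+fuel) := by
        have : j + 1 + fuel = j + (fuel+1) := by omega
        rw [this]; exact hfuel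
      rw [hcnt, hstep, ih (j+1) _ hle hfu]
      rw [PySem.List.pyRange_one_cons (a := (j:Int)) hjlt]
      simp only [List.map_cons, Int.toNat_natCast]
      push_cast
      simp [List.append_assoc]

-- ===== VERDICT (by name: the statement is the Claim_ definition above) =====
theorem dyadic_buckets_spec : Claim_equal_dyadic_buckets := by
  intro elts x hDom hPre
  unfold Spec_dyadic_buckets
  cases elts with
  | nil => rfl
  | cons e rest =>
    have hmmem : rest.foldl max e ∈ e :: rest := by
      rcases PySem.List.foldl_max_mem rest e with h | h
      · rw [h]; exact List.mem_cons_self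
      · exact List.mem_cons_of_mem _ h
    set m := rest.foldl max e with hm
    by_cases hxm : m < x
    · -- A's while condition is false at once; B's early return
      simp only [dyadic_buckets, dyadic_buckets_alt]
      rw [show (64:Nat) = 63+1 from rfl, dyALoop, if_neg (not_le.mpr hxm), if_pos hxm]
    · have hxle : x ≤ m := not_lt.mp hxm
      have hx : 0 < x := by
        rcases hPre with h | h
        · exact h
        · exact absurd (h m hmmem) (by omega)
      have hmle : m ≤ 2147483648 := by
        unfold Dom_dyadic_buckets at hDom
        simp only [Bool.and_eq_true, List.all_eq_true] at hDom
        have := hDom.1 m hmmem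
        simp [pvDomInt] at this
        omega
      have h64 : m < x * 2^(0+64) := by
        have h1 : (1:Int) ≤ x := hx
        calc m ≤ 2147483648 := hmle
          _ < 1 * 2^(0+64) := by norm_num
          _ ≤ x * 2^(0+64) := by
              apply mul_le_mul_of_nonneg_right h1 (by positivity)
      have hloop := dyALoop_eq (e :: rest) m x hx 64 0 [] (by simpa using hxle) h64
      simp only [pow_zero, mul_one, Nat.cast_zero] at hloop
      simp only [dyadic_buckets, dyadic_buckets_alt]
      rw [hloop, if_neg (not_lt.mpr hxle)]
      simp only [List.nil_append]
      apply List.map_congr_left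
      intro i hi
      have hi0 : 0 ≤ i := (PySem.List.mem_pyRange_one.mp hi).1
      have hin : i = (i.toNat : Int) := (Int.toNat_of_nonneg hi0).symm
      have h1 : (i + 1).toNat = i.toNat + 1 := by omega
      rw [h1]
      have hc := counts_getD (e :: rest) x hx i.toNat
      rw [← hin] at hc
      rw [hc]
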